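-- pv_equiv track=rewrite | github.com/Aleksey136/FullPracticePython | practice2/f23.py | f22
-- ===== SOURCE A (Python) =====
-- def f22(line):
--     line2 = str(bin(int(line, 16)))
--     while len(line2) != 34:
--         line2 = "0b0" + line2[2:]
--     A = line2[22:]
--     B = line2[10:22]
--     C = line2[4:10]
--     D = line2[3]
--     E = line2[2]
--     line2 = "0b" + D + A + B + E + C
--     return str(hex(int(line2, 2)))
-- ===== SOURCE B (Python) =====
-- def f22(line):
--     n = int(line, 16)
--     a = n % 4096
--     b = n // 4096 % 4096
--     c = n // 16777216 % 64
--     d = n // 1073741824 % 2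
--     e = n // 2147483648 % 2
--     return hex(d * 2147483648 + a * 524288 + b * 128 + e * 64 + c)
-- ===== Notes on version B (the rewrite author's own statement) =====
-- stated objective: alternative
-- what changed: B replaces A's binary-string padding loop and slice permutation with pure integer arithmetic: it extracts the five bit fields with // and % and recombines them with multiplications and additions, never materialising a binary string.
import Mathlib
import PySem

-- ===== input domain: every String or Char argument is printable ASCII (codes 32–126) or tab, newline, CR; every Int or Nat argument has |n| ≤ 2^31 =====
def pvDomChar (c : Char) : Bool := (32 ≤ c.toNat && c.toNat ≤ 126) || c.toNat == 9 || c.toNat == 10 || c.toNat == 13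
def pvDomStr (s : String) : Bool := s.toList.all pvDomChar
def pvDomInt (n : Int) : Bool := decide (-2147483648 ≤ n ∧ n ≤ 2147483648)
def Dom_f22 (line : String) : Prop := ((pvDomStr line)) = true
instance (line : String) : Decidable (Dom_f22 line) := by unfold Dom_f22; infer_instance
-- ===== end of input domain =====

-- B (f22_alt) drops A's binary-string padding/slicing entirely: it extracts the five bit
-- fields with integer division/remainder and recombines them arithmetically (alternative
-- algorithm: integer bit arithmetic instead of string manipulation).

-- ===== PORT A =====
-- hand port of str(hex(n)) (CPython hex(): lowercase digits, "0x"/"-0x" prefix); exact for all ints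
def pyHexStr (n : Int) : String :=
  if n < 0 then "-0x" ++ String.mk (Nat.toDigits 16 n.natAbs) else "0x" ++ String.mk (Nat.toDigits 16 n.toNat)

-- the loop 'while len(line2) != 34: line2 = "0b0" + line2[2:]'; fuel 40 suffices whenever the
-- Python loop terminates (Pre_ admits exactly those inputs; Python diverges past length 34)
def f22Pad : Nat → List Char → List Char
  | 0, cs => cs
  | fuel+1, cs => if cs.length = 34 then cs else f22Pad fuel ('0'::'b'::'0'::cs.drop 2)

def f22 (line : String) : String :=
  match PySem.Int.ofStrBase? line 16 with
  | none => ""           -- int(line, 16) raises ValueError: outside Pre_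
  | some n =>
    let line2 := f22Pad 40 (PySem.Int.toBinChars0b n)
    let A := PySem.List.slice line2 (some 22) none
    let B := PySem.List.slice line2 (some 10) (some 22)
    let C := PySem.List.slice line2 (some 4) (some 10)
    match PySem.List.pyGet? line2 3, PySem.List.pyGet? line2 2 with
    | some D, some E =>
      match PySem.Int.ofCharsBase? ('0'::'b'::D::(A ++ B ++ E::C)) 2 with
      | some m => pyHexStr m
      | none => ""       -- int(line2, 2) raises ValueError: outside Pre_
    | _, _ => ""         -- IndexError: outside Pre_

-- ===== PORT B =====
def f22_alt (line : String) : String :=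
  match PySem.Int.ofStrBase? line 16 with
  | none => ""           -- int(line, 16) raises ValueError: B raises there too
  | some n =>
    let a := PySem.Int.mod n 4096
    let b := PySem.Int.mod (PySem.Int.floordiv n 4096) 4096
    let c := PySem.Int.mod (PySem.Int.floordiv n 16777216) 64
    let d := PySem.Int.mod (PySem.Int.floordiv n 1073741824) 2
    let e := PySem.Int.mod (PySem.Int.floordiv n 2147483648) 2
    pyHexStr (d * 2147483648 + a * 524288 + b * 128 + e * 64 + c)

-- ===== PRECONDITION & SPEC =====
-- Pre_: int(line, 16) parses and the value is in [0, 2^32). Outside: A raises ValueError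
-- (unparsable input, where B raises too) or, for negative values and values ≥ 2^32, A's
-- padding loop never reaches length 34 and diverges (A returns nothing there).
def Pre_f22 (line : String) : Prop :=
  (PySem.Int.ofStrBase? line 16).isSome = true ∧
  0 ≤ (PySem.Int.ofStrBase? line 16).getD 0 ∧
  (PySem.Int.ofStrBase? line 16).getD 0 < 4294967296
instance (line : String) : Decidable (Pre_f22 line) := by unfold Pre_f22; infer_instance

def pvWitness_f22 : String := "1a2b3c4d"

def Spec_f22 (line : String) (out : String) : Prop := out = f22_alt line
instance (line : String) (out : String) : Decidable (Spec_f22 line out) := by unfold Spec_f22; infer_instance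

-- ===== CLAIM (what is proved, stated in full; the proofs are below) =====
def Claim_equal_f22 : Prop := ∀ (line : String), Dom_f22 line → Pre_f22 line → Spec_f22 line (f22 line)

-- ===== LEMMAS AND PROOFS =====

def isBin (c : Char) : Prop := c = '0' ∨ c = '1'

def myDigitOk (b : ℕ) (c : Char) : Bool :=
  match PySem.Int.digitVal? c with
  | some d => decide (d < b)
  | none => false

def cstep (a : ℕ) (c : Char) : ℕ := a * 2 + (PySem.Int.digitVal? c).getD 0

theorem strip_id (l : List Char) (hns : ∀ c ∈ l, PySem.Int.isIntSpace c = false) :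
    (List.dropWhile PySem.Int.isIntSpace
      (List.dropWhile PySem.Int.isIntSpace l).reverse).reverse = l := by
  have e1 : List.dropWhile PySem.Int.isIntSpace l = l := by
    rw [List.dropWhile_eq_self_iff]
    intro hl hp
    rw [hns _ (List.getElem_mem hl)] at hp
    simp at hp
  rw [e1]
  have e2 : List.dropWhile PySem.Int.isIntSpace l.reverse = l.reverse := by
    rw [List.dropWhile_eq_self_iff]
    intro hl hp
    have hm : l.reverse[0] ∈ l := by simpa using List.getElem_mem hl
    rw [hns _ hm] at hp
    simp at hp
  rw [e2, List.reverse_reverse]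

-- A characterisation of int(s, 2)'s digit loop through abstract F/G: instantiated below with
-- PySem's internal parser functions (captured by unification, hypotheses discharged by rfl).
theorem glue (F : ℕ → List Char → Option ℕ) (G : List Char → Bool → ℕ → Option ℕ)
    (hF : ∀ cs : List Char, F 2 cs = match cs with | [] => (none : Option ℕ) | cs => G cs false 0)
    (hnil : ∀ (ad : Bool) (a : ℕ), G [] ad a = if ad = true then some a else none)
    (hcons : ∀ (c : Char) (t : List Char) (ad : Bool) (a : ℕ), G (c :: t) ad a =
      if myDigitOk 2 c = true then G t true (a * 2 + (PySem.Int.digitVal? c).getD 0)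
      else if c = '_' ∧ ad = true then
        (match t with
          | d :: _ => if myDigitOk 2 d = true then G t false a else none
          | [] => none)
      else none)
    (c : Char) (cs : List Char) (hc : isBin c) (hcs : ∀ x ∈ cs, isBin x) :
    (match F 2 (c :: cs) with
      | none => (none : Option ℤ)
      | some n => some ↑n) = some ((List.foldl cstep ((PySem.Int.digitVal? c).getD 0) cs : ℕ) : ℤ) := by
  have aux : ∀ (l : List Char) (a : ℕ), (∀ x ∈ l, isBin x) → G l true a = some (List.foldl cstep a l) := by
    intro l
    induction l with
    | nil => intro a _; rw [hnil]; simp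
    | cons x t ih =>
      intro a hxl
      rw [hcons]
      rcases hxl x (by simp) with h | h <;> subst h <;>
        [rw [if_pos (by decide : myDigitOk 2 '0' = true)]; rw [if_pos (by decide : myDigitOk 2 '1' = true)]] <;>
        · rw [List.foldl_cons]
          exact ih _ (fun y hy => hxl y (List.mem_cons_of_mem _ hy))
  rw [hF]
  have hv : G (c :: cs) false 0 = some (List.foldl cstep ((PySem.Int.digitVal? c).getD 0) cs) := by
    rw [hcons]
    rcases hc with h | h <;> subst h
    · rw [if_pos (by decide : myDigitOk 2 '0' = true)]
      simpa using aux cs _ hcs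
    · rw [if_pos (by decide : myDigitOk 2 '1' = true)]
      simpa using aux cs _ hcs
  simp [hv]

-- int("0b" + D + rest, 2) for binary-digit characters, as a fold
theorem parse0b (c : Char) (cs : List Char) (hc : isBin c) (hcs : ∀ x ∈ cs, isBin x) :
    PySem.Int.ofCharsBase? ('0' :: 'b' :: c :: cs) 2
      = some ((List.foldl cstep ((PySem.Int.digitVal? c).getD 0) cs : ℕ) : ℤ) := by
  have hns : ∀ x ∈ '0' :: 'b' :: c :: cs, PySem.Int.isIntSpace x = false := by
    intro x hx
    rcases List.mem_cons.mp hx with h | hx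
    · rw [h]; rfl
    rcases List.mem_cons.mp hx with h | hx
    · rw [h]; rfl
    rcases List.mem_cons.mp hx with h | hx
    · rcases hc with h' | h' <;> rw [h, h'] <;> rfl
    · rcases hcs x hx with h' | h' <;> rw [h'] <;> rfl
  simp only [PySem.Int.ofCharsBase?]
  rw [strip_id _ hns]
  rcases hc with h | h <;> subst h <;>
  · simp
    exact glue _ _ (fun l => rfl) (fun ad a => rfl) (fun x t ad a => rfl) _ cs (by simp [isBin]) hcs

-- fixed-width big-endian binary representation, as characters
def crep : ℕ → ℕ → List Char
  | 0, _ => []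
  | k+1, m => crep k (m / 2) ++ [if m % 2 = 1 then '1' else '0']

theorem crep_length (k m : ℕ) : (crep k m).length = k := by
  induction k generalizing m with
  | zero => rfl
  | succ k ih => simp [crep, ih]

theorem crep_isBin (k m : ℕ) : ∀ x ∈ crep k m, isBin x := by
  induction k generalizing m with
  | zero => intro x hx; cases hx
  | succ k ih =>
    intro x hx
    rw [crep] at hx
    rcases List.mem_append.mp hx with h | h
    · exact ih _ x h
    · rcases List.mem_singleton.mp h with rfl
      by_cases h2 : m % 2 = 1
      · right; simp [h2]
      · left; simp [h2]

theorem dv_if (x : ℕ) :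
    (PySem.Int.digitVal? (if x % 2 = 1 then '1' else '0')).getD 0 = x % 2 := by
  rcases Nat.mod_two_eq_zero_or_one x with h | h <;> rw [h] <;> decide

theorem crep_fold (k m a : ℕ) : List.foldl cstep a (crep k m) = a * 2 ^ k + m % 2 ^ k := by
  induction k generalizing a m with
  | zero => simp [crep, Nat.mod_one]
  | succ k ih =>
    rw [crep, List.foldl_append, ih, List.foldl_cons, List.foldl_nil, cstep, dv_if]
    have h2 : m % 2 ^ (k + 1) = m % 2 + 2 * (m / 2 % 2 ^ k) := by
      have := Nat.mod_mul (x := m) (a := 2) (b := 2 ^ k)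
      rw [← pow_succ'] at this
      omega
    rw [h2, pow_succ]
    ring

theorem crep_split (k1 k2 m : ℕ) : crep (k1 + k2) m = crep k1 (m / 2 ^ k2) ++ crep k2 (m % 2 ^ k2) := by
  induction k2 generalizing m with
  | zero => simp [crep]
  | succ k2 ih =>
    have e1 : k1 + (k2 + 1) = (k1 + k2) + 1 := by omega
    rw [e1, crep, ih, crep]
    have hdd : m / 2 / 2 ^ k2 = m / 2 ^ (k2 + 1) := by
      rw [Nat.div_div_eq_div_mul, ← pow_succ']
    have hmod2 : m % 2 ^ (k2 + 1) % 2 = m % 2 := by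
      have : (2:ℕ) ∣ 2 ^ (k2 + 1) := dvd_pow_self 2 (by omega)
      exact Nat.mod_mod_of_dvd m this
    have hmd : m % 2 ^ (k2 + 1) / 2 = m / 2 % 2 ^ k2 := by
      have h1 := Nat.mod_mul (x := m) (a := 2) (b := 2 ^ k2)
      rw [← pow_succ'] at h1
      omega
    rw [hdd, hmod2, hmd, List.append_assoc]

theorem drop_crep (k1 k2 m : ℕ) : List.drop k1 (crep (k1 + k2) m) = crep k2 (m % 2 ^ k2) := by
  rw [crep_split]
  have h := List.drop_left (l₁ := crep k1 (m / 2 ^ k2)) (l₂ := crep k2 (m % 2 ^ k2))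
  rw [crep_length] at h
  exact h

theorem take_crep (k1 k2 m : ℕ) : List.take k1 (crep (k1 + k2) m) = crep k1 (m / 2 ^ k2) := by
  rw [crep_split]
  have h := List.take_left (l₁ := crep k1 (m / 2 ^ k2)) (l₂ := crep k2 (m % 2 ^ k2))
  rw [crep_length] at h
  exact h

theorem crep_zero (k : ℕ) : crep k 0 = List.replicate k '0' := by
  induction k with
  | zero => rfl
  | succ k ih => rw [crep, ih, List.replicate_succ']; norm_num

theorem toDigits_crep (m : ℕ) : ∀ k, m < 2 ^ k → 0 < k →
    List.replicate (k - (Nat.toDigits 2 m).length) '0' ++ Nat.toDigits 2 m = crep k m := by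
  induction m using Nat.strong_induction_on with
  | _ m ih =>
    intro k hk hk0
    by_cases hm : m < 2
    · obtain ⟨j, rfl⟩ : ∃ j, k = j + 1 := ⟨k - 1, by omega⟩
      rw [Nat.toDigits_of_lt_base hm, crep, Nat.div_eq_of_lt hm, crep_zero]
      have : m.digitChar = (if m % 2 = 1 then '1' else '0') := by
        interval_cases m <;> decide
      rw [this]
      simp
    · rw [Nat.toDigits_eq_if (by omega), if_neg (by omega)]
      obtain ⟨j, rfl⟩ : ∃ j, k = j + 1 := ⟨k - 1, by omega⟩
      have hj0 : 0 < j := by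
        by_contra h
        have : j = 0 := by omega
        subst this
        simp at hk
        omega
      have hmj : m / 2 < 2 ^ j := by
        have : 2 ^ (j + 1) = 2 ^ j * 2 := by ring
        omega
      have ihm := ih (m / 2) (by omega) j hmj hj0
      have hdc : (m % 2).digitChar = (if m % 2 = 1 then '1' else '0') := by
        rcases Nat.mod_two_eq_zero_or_one m with h | h <;> rw [h] <;> decide
      rw [crep, ← ihm, hdc]
      simp only [List.length_append, List.length_cons, List.length_nil, List.append_assoc]
      have hlen : ∀ L : ℕ, j + 1 - (L + (0 + 1)) = j - L := fun L => by omega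
      rw [hlen]

-- number of binary digits of m < 2^32 is at most 32
theorem toDigits_len32 (m : ℕ) (h : m < 2 ^ 32) : (Nat.toDigits 2 m).length ≤ 32 :=
  Nat.toDigits_length 2 m 32 (by omega) h

theorem f22Pad_eq (fuel : Nat) : ∀ (rest : List Char), rest.length ≤ 32 → 32 ≤ rest.length + fuel →
    f22Pad fuel ('0'::'b'::rest) = '0'::'b'::(List.replicate (32 - rest.length) '0' ++ rest) := by
  induction fuel with
  | zero =>
    intro rest h1 h2
    have : rest.length = 32 := by omega
    rw [f22Pad, this]
    simp
  | succ fuel ih =>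
    intro rest h1 h2
    rw [f22Pad]
    by_cases h : rest.length = 32
    · simp [h]
    · simp only [List.drop, if_neg (by simp; omega : ¬ ('0'::'b'::rest).length = 34)]
      rw [show ('0'::'b'::'0'::rest) = ('0'::'b'::('0'::rest)) from rfl]
      rw [ih ('0'::rest) (by simp; omega) (by simp; omega)]
      congr 1
      congr 1
      have : 32 - rest.length = (32 - ('0'::rest).length) + 1 := by simp; omega
      rw [this, List.replicate_succ']
      simp

theorem mod_div_eq (m i j : ℕ) : m % 2 ^ (i + j) / 2 ^ i = m / 2 ^ i % 2 ^ j := by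
  have h := Nat.mod_mul (x := m) (a := 2 ^ i) (b := 2 ^ j)
  rw [← pow_add] at h
  rw [h, Nat.add_mul_div_left _ _ (Nat.two_pow_pos i),
    Nat.div_eq_of_lt (Nat.mod_lt _ (Nat.two_pow_pos i))]
  omega


theorem intFields_eq (n : ℤ) (h0 : 0 ≤ n) :
    (PySem.Int.mod (PySem.Int.floordiv n 1073741824) 2 * 2147483648 + PySem.Int.mod n 4096 * 524288 +
      PySem.Int.mod (PySem.Int.floordiv n 4096) 4096 * 128 +
      PySem.Int.mod (PySem.Int.floordiv n 2147483648) 2 * 64 +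
      PySem.Int.mod (PySem.Int.floordiv n 16777216) 64)
    = ((n.toNat / 1073741824 % 2 * 2147483648 + n.toNat % 4096 * 524288 + n.toNat / 4096 % 4096 * 128 +
        n.toNat / 2147483648 % 2 * 64 + n.toNat / 16777216 % 64 : ℕ) : ℤ) := by
  obtain ⟨m, rfl⟩ : ∃ m : ℕ, n = (m : ℤ) := ⟨n.toNat, (Int.toNat_of_nonneg h0).symm⟩
  simp only [PySem.Int.mod, PySem.Int.floordiv, Int.fmod_eq_emod, Int.fdiv_eq_ediv]
  norm_num

set_option maxHeartbeats 1000000 in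
theorem f22_main (line : String) (h : Pre_f22 line) : f22 line = f22_alt line := by
  obtain ⟨hs, h0, h32⟩ := h
  cases hof : PySem.Int.ofStrBase? line 16 with
  | none => rw [hof] at hs; simp at hs
  | some n =>
    rw [hof] at h0 h32
    simp only [Option.getD_some] at h0 h32
    set N := n.toNat with hN
    have hm32 : N < 2 ^ 32 := by omega
    -- A's padded string is the 32-bit representation crep 32 N
    have hd0b : PySem.Int.toBinChars0b n = '0'::'b'::Nat.toDigits 2 N := by
      simp [PySem.Int.toBinChars0b, not_lt.mpr h0]
      rw [hN]
    have hpad : f22Pad 40 (PySem.Int.toBinChars0b n) = '0'::'b'::crep 32 N := by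
      rw [hd0b, f22Pad_eq 40 _ (toDigits_len32 N hm32) (by have := toDigits_len32 N hm32; omega)]
      rw [toDigits_crep N 32 hm32 (by omega)]
    set q : List Char := crep 32 N with hq
    clear_value q
    -- field values
    set va : ℕ := N % 4096 with hva
    set vb : ℕ := N / 4096 % 4096 with hvb
    set vc : ℕ := N / 16777216 % 64 with hvc
    set vd : ℕ := N / 1073741824 % 2 with hvd
    set ve : ℕ := N / 2147483648 % 2 with hve
    -- slices of q
    have hA : List.drop 20 q = crep 12 (N % 2 ^ 12) := by
      rw [hq, show (32:ℕ) = 20 + 12 by norm_num, drop_crep]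
    have hB : (List.drop 8 q).take 12 = crep 12 (N % 2 ^ 24 / 2 ^ 12) := by
      rw [hq, show (32:ℕ) = 8 + 24 by norm_num, drop_crep,
        show (24:ℕ) = 12 + 12 by norm_num, take_crep]
    have hC : (List.drop 2 q).take 6 = crep 6 (N % 2 ^ 30 / 2 ^ 24) := by
      rw [hq, show (32:ℕ) = 2 + 30 by norm_num, drop_crep,
        show (30:ℕ) = 6 + 24 by norm_num, take_crep]
    have hsplit230 : q = crep 2 (N / 2 ^ 30) ++ crep 30 (N % 2 ^ 30) := by
      rw [hq, show (32:ℕ) = 2 + 30 by norm_num]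
      exact crep_split 2 30 N
    -- individual characters q[0] (E) and q[1] (D)
    have hq2 : crep 2 (N / 2 ^ 30) =
        [if N / 2 ^ 30 / 2 % 2 = 1 then '1' else '0', if N / 2 ^ 30 % 2 = 1 then '1' else '0'] := by
      rw [crep, crep, crep]
      simp
    have hE : q[0]? = some (if N / 2 ^ 30 / 2 % 2 = 1 then '1' else '0') := by
      rw [hsplit230, hq2]; rfl
    have hD : q[1]? = some (if N / 2 ^ 30 % 2 = 1 then '1' else '0') := by
      rw [hsplit230, hq2]; rfl
    -- PySem slice / pyGet? plumbing on '0'::'b'::q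
    have sA : PySem.List.slice ('0'::'b'::q) (some 22) none = List.drop 20 q := by
      have := PySem.List.slice_from_natCast (xs := '0'::'b'::q) (a := 22)
      norm_num at this
      rw [this]
    have sB : PySem.List.slice ('0'::'b'::q) (some 10) (some 22) = (List.drop 8 q).take 12 := by
      have := PySem.List.slice_natCast (xs := '0'::'b'::q) (a := 10) (b := 22)
      norm_num at this
      rw [this]
    have sC : PySem.List.slice ('0'::'b'::q) (some 4) (some 10) = (List.drop 2 q).take 6 := by
      have := PySem.List.slice_natCast (xs := '0'::'b'::q) (a := 4) (b := 10)
      norm_num at this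
      rw [this]
    have g3 : PySem.List.pyGet? ('0'::'b'::q) 3 = q[1]? := by
      have := PySem.List.pyGet?_natCast (xs := '0'::'b'::q) (n := 3)
      norm_num at this
      rw [this]
    have g2 : PySem.List.pyGet? ('0'::'b'::q) 2 = q[0]? := by
      have := PySem.List.pyGet?_natCast (xs := '0'::'b'::q) (n := 2)
      norm_num at this
      rw [this]
    -- the parsed value of the permuted string
    set Dch : Char := if N / 2 ^ 30 % 2 = 1 then '1' else '0' with hDch
    set Ech : Char := if N / 2 ^ 30 / 2 % 2 = 1 then '1' else '0' with hEch
    set tail : List Char := crep 12 (N % 2 ^ 12) ++ crep 12 (N % 2 ^ 24 / 2 ^ 12)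
      ++ Ech :: crep 6 (N % 2 ^ 30 / 2 ^ 24) with htail
    have htailBin : ∀ x ∈ tail, isBin x := by
      intro x hx
      rw [htail] at hx
      rcases List.mem_append.mp hx with hx | hx
      rcases List.mem_append.mp hx with hx | hx
      · exact crep_isBin _ _ x hx
      · exact crep_isBin _ _ x hx
      rcases List.mem_cons.mp hx with rfl | hx
      · rw [hEch]; by_cases h : N / 2 ^ 30 / 2 % 2 = 1
        · right; rw [if_pos h]
        · left; rw [if_neg h]
      · exact crep_isBin _ _ x hx
    have hDbin : isBin Dch := by
      rw [hDch]; by_cases h : N / 2 ^ 30 % 2 = 1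
      · right; rw [if_pos h]
      · left; rw [if_neg h]
    have hparse := parse0b Dch tail hDbin htailBin
    -- value of the fold
    have hfold : List.foldl cstep ((PySem.Int.digitVal? Dch).getD 0) tail
        = vd * 2147483648 + va * 524288 + vb * 128 + ve * 64 + vc := by
      rw [htail, List.foldl_append, List.foldl_append, List.foldl_cons]
      rw [crep_fold, crep_fold, crep_fold]
      rw [hDch, dv_if]
      rw [show cstep ((N / 2 ^ 30 % 2 * 2 ^ 12 + N % 2 ^ 12 % 2 ^ 12) * 2 ^ 12
            + N % 2 ^ 24 / 2 ^ 12 % 2 ^ 12) Ech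
          = ((N / 2 ^ 30 % 2 * 2 ^ 12 + N % 2 ^ 12 % 2 ^ 12) * 2 ^ 12
            + N % 2 ^ 24 / 2 ^ 12 % 2 ^ 12) * 2 + N / 2 ^ 30 / 2 % 2 by
        rw [hEch, cstep, dv_if]]
      have m12 : ∀ x : ℕ, x % 2 ^ 12 % 2 ^ 12 = x % 2 ^ 12 := fun x => Nat.mod_mod_of_dvd x dvd_rfl
      have m6 : ∀ x : ℕ, x % 2 ^ 6 % 2 ^ 6 = x % 2 ^ 6 := fun x => Nat.mod_mod_of_dvd x dvd_rfl
      have e2 : N % 2 ^ 24 / 2 ^ 12 = N / 2 ^ 12 % 2 ^ 12 := by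
        rw [show (24:ℕ) = 12 + 12 by norm_num]; exact mod_div_eq N 12 12
      have e3 : N % 2 ^ 30 / 2 ^ 24 = N / 2 ^ 24 % 2 ^ 6 := by
        rw [show (30:ℕ) = 24 + 6 by norm_num]; exact mod_div_eq N 24 6
      have e4 : N / 2 ^ 30 / 2 = N / 2 ^ 31 := by
        rw [Nat.div_div_eq_div_mul]; congr 1
      rw [m12 N, e2, m12 (N / 2 ^ 12), e3, m6 (N / 2 ^ 24), e4]
      rw [hva, hvb, hvc, hvd, hve]
      norm_num
      ring
    -- A's result
    have hAres : f22 line = pyHexStr ((vd * 2147483648 + va * 524288 + vb * 128 + ve * 64 + vc : ℕ) : ℤ) := by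
      simp only [f22, hof, hpad, sA, sB, sC, g3, g2, hE, hD]
      rw [show (List.drop 20 q ++ (List.drop 8 q).take 12 ++ Ech :: (List.drop 2 q).take 6) = tail by
        rw [htail, hA, hB, hC]]
      rw [hparse, hfold]
    -- B's result
    have hBres : f22_alt line = pyHexStr ((vd * 2147483648 + va * 524288 + vb * 128 + ve * 64 + vc : ℕ) : ℤ) := by
      simp only [f22_alt, hof]
      refine congrArg pyHexStr ?_
      rw [hva, hvb, hvc, hvd, hve, hN]
      exact intFields_eq n h0
    rw [hAres, hBres]

-- ===== VERDICT (by name: the statement is the Claim_ definition above) =====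
theorem f22_spec : Claim_equal_f22 := by
  intro line _ hpre
  exact f22_main line hpre
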